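-- pv_equiv track=rewrite | github.com/ArthurFr10/codigos-Phyton | Exercicio 42.py | positivo_negativo
-- ===== SOURCE A (Python) =====
-- def positivo_negativo(a):
--     contador_positivo = 0
--     contador_negativo = 0
--     for numero in a:
--         if numero >= 0:
--             contador_positivo += 1
--         else:
--             contador_negativo += 1
--     return contador_positivo, contador_negativo
-- ===== SOURCE B (Python) =====
-- def positivo_negativo(a):
--     items = sorted(a)
--     lo = 0
--     hi = len(items)
--     while lo < hi:
--         mid = (lo + hi) // 2
--         if items[mid] < 0:
--             lo = mid + 1
--         else:
--             hi = mid
--     return len(items) - lo, lo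
-- ===== Notes on version B (the rewrite author's own statement) =====
-- stated objective: alternative
-- what changed: B sorts the list and binary-searches for the first non-negative position, reading both counts off that boundary, instead of A's single pass with two branching counters.
import Mathlib
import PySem

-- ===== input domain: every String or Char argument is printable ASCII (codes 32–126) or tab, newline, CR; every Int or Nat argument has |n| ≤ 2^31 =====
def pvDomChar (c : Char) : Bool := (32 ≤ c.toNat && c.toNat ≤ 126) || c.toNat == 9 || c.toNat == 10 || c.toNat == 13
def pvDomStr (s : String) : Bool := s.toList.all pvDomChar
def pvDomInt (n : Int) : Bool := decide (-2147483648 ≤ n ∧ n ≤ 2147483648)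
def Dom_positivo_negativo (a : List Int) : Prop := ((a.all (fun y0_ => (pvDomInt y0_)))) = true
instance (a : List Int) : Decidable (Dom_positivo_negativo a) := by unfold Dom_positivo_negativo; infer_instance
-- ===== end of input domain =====

-- B sorts the list and binary-searches the first non-negative position, reading both counts
-- off that boundary — a different algorithm (sort + binary search) instead of A's two-counter pass.

-- ===== PORT A =====
-- loop maintaining two counters, branch order as in the Python
def positivo_negativo (a : List Int) : Int × Int :=
  let st := a.foldl (fun (st : Int × Int) numero =>
    if numero ≥ 0 then (st.1 + 1, st.2) else (st.1, st.2 + 1)) (0, 0)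
  (st.1, st.2)

-- ===== PORT B =====
-- the while-loop of Source B: binary search for the first index with items[mid] ≥ 0.
-- The 'none' arm is unreachable (mid always lies in [lo, hi) ⊆ [0, len)); Python never indexes out of range here.
def pvBsLoop (items : List Int) (lo hi : Int) : Int :=
  if h : lo < hi then
    let mid := PySem.Int.floordiv (lo + hi) 2
    match PySem.List.pyGet? items mid with
    | some v => if v < 0 then pvBsLoop items (mid + 1) hi else pvBsLoop items lo mid
    | none => lo
  else lo
termination_by (hi - lo).toNat
decreasing_by
  · have h1 := (PySem.Int.floordiv_two_mid_bounds (le_of_lt h)).1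
    have h2 : PySem.Int.floordiv (lo + hi) 2 < hi := by
      rw [PySem.Int.floordiv_lt_iff_lt_mul (by omega : (0:Int) < 2)]; omega
    omega
  · have h1 := (PySem.Int.floordiv_two_mid_bounds (le_of_lt h)).1
    have h2 : PySem.Int.floordiv (lo + hi) 2 < hi := by
      rw [PySem.Int.floordiv_lt_iff_lt_mul (by omega : (0:Int) < 2)]; omega
    omega

def positivo_negativo_alt (a : List Int) : Int × Int :=
  let items := PySem.List.sorted a (fun x => x) false
  let lo := pvBsLoop items 0 (items.length : Int)
  ((items.length : Int) - lo, lo)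

-- ===== PRECONDITION & SPEC =====
def Spec_positivo_negativo (a : List Int) (out : Int × Int) : Prop := out = positivo_negativo_alt a
instance (a : List Int) (out : Int × Int) : Decidable (Spec_positivo_negativo a out) := by unfold Spec_positivo_negativo; infer_instance

-- ===== CLAIM =====
def Claim_equal_positivo_negativo : Prop := ∀ (a : List Int), Dom_positivo_negativo a → Spec_positivo_negativo a (positivo_negativo a)

-- ===== LEMMAS AND PROOFS =====
-- A's fold computes (count of x ≥ 0, count of x < 0).
theorem positivo_negativo_foldl (a : List Int) (p n : Int) :
    a.foldl (fun (st : Int × Int) numero =>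
      if numero ≥ 0 then (st.1 + 1, st.2) else (st.1, st.2 + 1)) (p, n)
    = (p + ((a.filter (fun x => 0 ≤ x)).length : Int),
       n + ((a.filter (fun x => x < 0)).length : Int)) := by
  induction a generalizing p n with
  | nil => simp
  | cons x xs ih =>
    by_cases h : x ≥ 0
    · simp only [List.foldl, List.filter, h, ge_iff_le, decide_eq_true_eq, if_pos h,
        decide_true, not_lt.mpr h, decide_false]
      rw [ih]
      simp [not_lt.mpr h, h]
      omega
    · simp only [List.foldl, List.filter, ge_iff_le, if_neg h]
      rw [ih]
      simp [h, not_le.mp h]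
      omega

-- in a list whose first n entries are negative and the rest non-negative, the negatives count is n
theorem filter_neg_length_of_split (s : List Int) (n : Nat) (hn : n ≤ s.length)
    (hneg : ∀ i : Nat, i < n → ∀ hi : i < s.length, s[i] < 0)
    (hpos : ∀ i : Nat, n ≤ i → ∀ hi : i < s.length, 0 ≤ s[i]) :
    (s.filter (fun x => x < 0)).length = n := by
  have hs : s = s.take n ++ s.drop n := (List.take_append_drop n s).symm
  rw [hs, List.filter_append]
  have h1 : (s.take n).filter (fun x => x < 0) = s.take n := by
    apply List.filter_eq_self.mpr
    intro x hx
    obtain ⟨i, hi, hix⟩ := List.mem_iff_getElem.mp hx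
    have hin : i < n := by simpa using lt_of_lt_of_le hi (by simp)
    have hilen : i < s.length := by omega
    have hgt : (s.take n)[i] = s[i] := List.getElem_take
    simp only [decide_eq_true_eq]
    rw [← hix, hgt]
    exact hneg i hin hilen
  have h2 : (s.drop n).filter (fun x => x < 0) = [] := by
    apply List.filter_eq_nil_iff.mpr
    intro x hx
    obtain ⟨i, hi, hix⟩ := List.mem_iff_getElem.mp hx
    have hilen : n + i < s.length := by
      have : (s.drop n).length = s.length - n := by simp
      omega
    have hgt : (s.drop n)[i] = s[n + i] := by
      simp [List.getElem_drop]
    simp only [decide_eq_true_eq, not_lt]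
    rw [← hix, hgt]
    exact hpos (n + i) (by omega) hilen
  rw [h1, h2]
  simp
  omega

-- binary-search invariant: on a ≤-sorted list with negatives below lo and non-negatives at/above hi,
-- the loop returns the negatives count
theorem pvBsLoop_correct (s : List Int)
    (hsort : ∀ i j : Nat, i ≤ j → ∀ hj : j < s.length, ∀ hi : i < s.length, s[i] ≤ s[j]) :
    ∀ (k : Nat) (lo hi : Int), (hi - lo).toNat = k → 0 ≤ lo → lo ≤ hi → hi ≤ s.length →
    (∀ i : Nat, (i : Int) < lo → ∀ hi' : i < s.length, s[i] < 0) →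
    (∀ i : Nat, hi ≤ (i : Int) → ∀ hi' : i < s.length, 0 ≤ s[i]) →
    pvBsLoop s lo hi = ((s.filter (fun x => x < 0)).length : Int) := by
  intro k
  induction k using Nat.strong_induction_on with
  | _ k ih =>
    intro lo hi hk h0 hlh hhl hneg hpos
    rw [pvBsLoop]
    by_cases hlt : lo < hi
    · simp only [hlt, dite_true]
      have hm1 := (PySem.Int.floordiv_two_mid_bounds (le_of_lt hlt)).1
      have hm2 : PySem.Int.floordiv (lo + hi) 2 < hi := by
        rw [PySem.Int.floordiv_lt_iff_lt_mul (by omega : (0:Int) < 2)]; omega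
      set mid := PySem.Int.floordiv (lo + hi) 2 with hmid
      have hmr : 0 ≤ mid := by omega
      have hml : mid < (s.length : Int) := by omega
      have hmlen : mid.toNat < s.length := by omega
      have hget : PySem.List.pyGet? s mid = some (s[mid.toNat]'hmlen) :=
        PySem.List.pyGet?_eq_some_getElem s hmr hml
      rw [hget]
      by_cases hv : (s[mid.toNat]'hmlen) < 0
      · simp only [hv, if_true]
        apply ih ((hi - (mid + 1)).toNat) (by omega) (mid + 1) hi rfl (by omega) (by omega) hhl
        · intro i hilt hi'
          have hile : i ≤ mid.toNat := by omega
          have := hsort i mid.toNat hile hmlen hi'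
          omega
        · exact hpos
      · simp only [hv, if_false]
        apply ih ((mid - lo).toNat) (by omega) lo mid rfl h0 (by omega) (by omega) hneg
        intro i hile hi'
        have hle : mid.toNat ≤ i := by omega
        have := hsort mid.toNat i hle hi' hmlen
        omega
    · simp only [hlt, dite_false]
      have hle : lo = hi := by omega
      have hcount : (s.filter (fun x => x < 0)).length = lo.toNat := by
        apply filter_neg_length_of_split s lo.toNat (by omega)
        · intro i hilt hi'; exact hneg i (by omega) hi'
        · intro i hige hi'; exact hpos i (by omega) hi'
      omega

-- the two filters partition the list
theorem pv_filter_split (l : List Int) :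
    (l.filter (fun x => 0 ≤ x)).length + (l.filter (fun x => x < 0)).length = l.length := by
  induction l with
  | nil => simp
  | cons x xs ih =>
    by_cases hx : (0:Int) ≤ x
    · simp [hx, not_lt.mpr hx]; omega
    · simp [hx, not_le.mp hx]; omega

-- ===== VERDICT =====
theorem positivo_negativo_spec : Claim_equal_positivo_negativo := by
  intro a _
  unfold Spec_positivo_negativo positivo_negativo positivo_negativo_alt
  set s := PySem.List.sorted a (fun x => x) false with hs
  have hperm : s.Perm a := PySem.List.sorted_perm a (fun x => x) false
  have hlen : s.length = a.length := hperm.length_eq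
  have hpw : s.Pairwise (fun x y => x ≤ y) := by
    simpa using PySem.List.sorted_pairwise a (fun x => x)
  have hsort : ∀ i j : Nat, i ≤ j → ∀ hj : j < s.length, ∀ hi : i < s.length, s[i] ≤ s[j] := by
    intro i j hij hj hi
    rcases Nat.eq_or_lt_of_le hij with h | h
    · subst h; exact le_refl _
    · exact (List.pairwise_iff_getElem.mp hpw) i j hi hj h
  have hbs : pvBsLoop s 0 (s.length : Int) = ((s.filter (fun x => x < 0)).length : Int) := by
    apply pvBsLoop_correct s hsort ((s.length : Int) - 0).toNat 0 (s.length) rfl (by omega)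
      (by omega) (by omega)
    · intro i hilt hi'; omega
    · intro i hige hi'
      exfalso; omega
  have hfneg : (s.filter (fun x => x < 0)).length = (a.filter (fun x => x < 0)).length :=
    (hperm.filter _).length_eq
  have hsum : (a.filter (fun x => 0 ≤ x)).length + (a.filter (fun x => x < 0)).length
      = a.length := pv_filter_split a
  rw [positivo_negativo_foldl]
  rw [hlen] at hbs
  dsimp only
  rw [hlen, hbs, hfneg, Prod.mk.injEq]
  constructor <;> omega
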